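-- pv_equiv track=rewrite | github.com/MariannaLeuckefeld/Purchase-Analytics | src/purchase_analytics.py | number_of_first_orders
-- ===== SOURCE A (Python) =====
-- def number_of_first_orders(results):
--     """calculate the number_of_first_orders (when reordered ==0) for every department ID"""
--     res = {}
--     department_ids = [r['department_id'] for r in results]
--     for department_id in department_ids:
--         res[department_id] = 0
--     for row in results:
--         if row['reordered'] == '0':
--             res[row['department_id']] += 1
--     return res
-- ===== SOURCE B (Python) =====
-- def number_of_first_orders(results):
--     """Per-department scan: dedupe the department ids in first-appearance order,
--     then count each department's first orders with its own pass over the rows.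
--     No shared counter dict is ever mutated."""
--     order = list(dict.fromkeys(r['department_id'] for r in results))
--     return {d: sum(1 for row in results
--                    if row['department_id'] == d and row['reordered'] == '0')
--             for d in order}
-- ===== Notes on version B (the rewrite author's own statement) =====
-- stated objective: alternative
-- what changed: B drops the counting dict entirely: it dedupes department ids in first-appearance order and then, for each distinct id, counts its first orders with a dedicated scan over the rows (per-key nested scan instead of per-row increment into a zero-initialised dict).
import Mathlib
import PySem

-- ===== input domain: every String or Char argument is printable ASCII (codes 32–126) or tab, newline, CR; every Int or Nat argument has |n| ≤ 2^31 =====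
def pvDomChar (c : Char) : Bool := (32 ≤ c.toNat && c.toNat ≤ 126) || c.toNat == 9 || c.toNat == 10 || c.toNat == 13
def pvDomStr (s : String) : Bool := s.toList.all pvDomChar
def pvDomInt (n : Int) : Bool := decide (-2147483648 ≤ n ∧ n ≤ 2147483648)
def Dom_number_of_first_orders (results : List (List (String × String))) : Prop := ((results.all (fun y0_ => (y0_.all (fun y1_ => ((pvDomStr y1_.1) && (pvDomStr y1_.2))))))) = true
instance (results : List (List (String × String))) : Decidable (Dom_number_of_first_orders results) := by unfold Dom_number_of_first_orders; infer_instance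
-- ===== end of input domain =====

-- B replaces A's zero-init-then-increment dict with per-department scans: dedupe the
-- department ids in first-appearance order, then count each id's first orders by its own
-- pass over the rows (objective: alternative algorithm, no counting dict; same results).

-- ===== PORT A =====
-- row['department_id'] / row['reordered']: first-match dict lookup; the '.getD ""' default is
-- only reached outside Pre_ (where the Python raises KeyError).
def pvDeptId (r : List (String × String)) : String :=
  ((PySem.Dict.mk r).get? "department_id").getD ""

def pvReordered (r : List (String × String)) : String :=
  ((PySem.Dict.mk r).get? "reordered").getD ""

def number_of_first_orders (results : List (List (String × String))) : List (String × Int) :=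
  let department_ids := results.map (fun r => pvDeptId r)
  let res := department_ids.foldl (fun d id => d.insert id (0 : Int))
    (PySem.Dict.empty : PySem.Dict String Int)
  let res := results.foldl
    (fun d row => if pvReordered row == "0" then d.modify (pvDeptId row) 0 (· + 1) else d) res
  res.items

-- ===== PORT B =====
def number_of_first_orders_alt (results : List (List (String × String))) : List (String × Int) :=
  let order := PySem.Set.ofList (results.map (fun r => pvDeptId r))
  (order.foldl
    (fun dct d => dct.insert d
      (results.foldl
        (fun acc row => if pvDeptId row == d && pvReordered row == "0" then acc + 1 else acc)
        (0 : Int)))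
    (PySem.Dict.empty : PySem.Dict String Int)).items

-- ===== PRECONDITION & SPEC =====
-- Pre_ excludes exactly the inputs on which the Python A raises KeyError:
-- a row missing the 'department_id' or the 'reordered' key.
def Pre_number_of_first_orders (results : List (List (String × String))) : Prop :=
  ∀ r ∈ results, "department_id" ∈ r.map Prod.fst ∧ "reordered" ∈ r.map Prod.fst
instance (results : List (List (String × String))) : Decidable (Pre_number_of_first_orders results) := by unfold Pre_number_of_first_orders; infer_instance

def pvWitness_number_of_first_orders : (List (List (String × String))) :=
  [[("department_id", "1"), ("reordered", "0")], [("department_id", "2"), ("reordered", "1")]]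

def Spec_number_of_first_orders (results : List (List (String × String))) (out : List (String × Int)) : Prop := out = number_of_first_orders_alt results
instance (results : List (List (String × String))) (out : List (String × Int)) : Decidable (Spec_number_of_first_orders results out) := by unfold Spec_number_of_first_orders; infer_instance

-- ===== CLAIM (what is proved, stated in full; the proofs are below) =====
def Claim_equal_number_of_first_orders : Prop := ∀ (results : List (List (String × String))), Dom_number_of_first_orders results → Pre_number_of_first_orders results → Spec_number_of_first_orders results (number_of_first_orders results)

-- ===== LEMMAS AND PROOFS =====

-- proof-only names
def pvIds (results : List (List (String × String))) : List String :=
  results.map (fun r => pvDeptId r)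

def pvFirsts (results : List (List (String × String))) : List String :=
  (results.filter (fun r => pvReordered r == "0")).map (fun r => pvDeptId r)

def pvZ (results : List (List (String × String))) : PySem.Dict String Int :=
  (pvIds results).foldl (fun d id => d.insert id (0 : Int)) PySem.Dict.empty

def pvA (results : List (List (String × String))) : PySem.Dict String Int :=
  results.foldl
    (fun d row => if pvReordered row == "0" then d.modify (pvDeptId row) 0 (· + 1) else d)
    (pvZ results)

theorem pvPortA_eq (results : List (List (String × String))) :
    number_of_first_orders results = (pvA results).items := rfl

-- A conditional loop is the plain loop over the filtered, mapped list.
theorem pvFoldl_if_filter_map {α β γ : Type} (g : γ → β → γ) (c : α → Bool) (k : α → β) :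
    ∀ (l : List α) (d : γ),
      l.foldl (fun d r => if c r then g d (k r) else d) d = ((l.filter c).map k).foldl g d := by
  intro l
  induction l with
  | nil => intro d; rfl
  | cons hd tl ih =>
    intro d
    by_cases h : c hd = true
    · simp [List.foldl, h, ih]
    · simp [List.foldl, h, ih]

-- zero-initialisation leaves every getD _ 0 at 0
theorem pvGetD_foldl_insert_zero (v : String) :
    ∀ (l : List String) (d : PySem.Dict String Int), d.getD v 0 = 0 →
      (l.foldl (fun d id => d.insert id (0 : Int)) d).getD v 0 = 0 := by
  intro l
  induction l with
  | nil => intro d h; exact h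
  | cons hd tl ih =>
    intro d h
    refine ih _ ?_
    rw [PySem.Dict.getD_insert]
    split_ifs <;> simp [h]

-- Set.update by elements already present is the identity
theorem pvUpdate_of_subset (s : PySem.Set String) (xs : List String)
    (h : ∀ x ∈ xs, x ∈ s) : PySem.Set.update s xs = s := by
  rw [PySem.Set.update_eq_append_filter]
  have hnil : ((PySem.Set.ofList xs).filter (fun y => !(PySem.Set.contains s y))) = [] := by
    rw [List.filter_eq_nil_iff]
    intro y hy
    simp [h y ((PySem.Set.mem_ofList xs y).mp hy)]
  rw [hnil, List.append_nil]

theorem pvA_rewrite (results : List (List (String × String))) :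
    pvA results = (pvFirsts results).foldl (fun d x => d.modify x 0 (· + 1)) (pvZ results) := by
  unfold pvA pvFirsts
  exact pvFoldl_if_filter_map
    (g := fun (d : PySem.Dict String Int) (x : String) => d.modify x 0 (· + 1))
    (c := fun r => pvReordered r == "0") (k := fun r => pvDeptId r) results (pvZ results)

theorem pvFirsts_subset (results : List (List (String × String))) :
    ∀ x ∈ pvFirsts results, x ∈ pvIds results := by
  intro x hx
  rcases List.mem_map.mp hx with ⟨r, hr, hrx⟩
  exact List.mem_map.mpr ⟨r, List.mem_of_mem_filter hr, hrx⟩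

theorem pvZ_keys (results : List (List (String × String))) :
    (pvZ results).keys = PySem.Set.ofList (pvIds results) := by
  unfold pvZ
  rw [PySem.Dict.keys_foldl_insert (pvIds results) (fun _ _ => (0 : Int)) PySem.Dict.empty]
  rw [show (PySem.Dict.empty : PySem.Dict String Int).keys = PySem.Set.empty from rfl,
    PySem.Set.update_empty]

theorem pvA_keys (results : List (List (String × String))) :
    (pvA results).keys = PySem.Set.ofList (pvIds results) := by
  rw [pvA_rewrite,
    PySem.Dict.keys_foldl_modify (pvFirsts results) 0 (fun _ _ v => v + 1) (pvZ results),
    pvZ_keys]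
  exact pvUpdate_of_subset _ _ (fun x hx =>
    (PySem.Set.mem_ofList _ x).mpr (pvFirsts_subset results x hx))

theorem pvZ_getD (results : List (List (String × String))) (v : String) :
    (pvZ results).getD v 0 = 0 := by
  unfold pvZ
  exact pvGetD_foldl_insert_zero v (pvIds results) PySem.Dict.empty (by simp)

theorem pvA_getD (results : List (List (String × String))) (v : String) :
    (pvA results).getD v 0 = ((pvFirsts results).count v : Int) := by
  rw [pvA_rewrite]
  rw [show (fun (d : PySem.Dict String Int) (x : String) => d.modify x 0 (· + 1)) =
      (fun (d : PySem.Dict String Int) (x : String) => d.modify x 0 fun y => y + 1) from rfl]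
  rw [PySem.Dict.getD_foldl_modify_add_one, pvZ_getD]
  ring

-- B's inner scan counts exactly the occurrences of d in the first-orders list
theorem pvScan_eq_count (d : String) :
    ∀ (l : List (List (String × String))) (acc : Int),
      l.foldl
        (fun acc row => if pvDeptId row == d && pvReordered row == "0" then acc + 1 else acc)
        acc = acc + ((pvFirsts l).count d : Int) := by
  intro l
  induction l with
  | nil => intro acc; simp [pvFirsts]
  | cons hd tl ih =>
    intro acc
    have hf : pvFirsts (hd :: tl) =
        if pvReordered hd == "0" then pvDeptId hd :: pvFirsts tl else pvFirsts tl := by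
      simp only [pvFirsts, List.filter_cons]
      split_ifs <;> simp
    rw [List.foldl_cons, ih, hf]
    by_cases h1 : pvDeptId hd = d <;> by_cases h2 : pvReordered hd = "0" <;>
      simp [h1, h2, List.count_cons] <;> push_cast <;> ring

def pvScan (results : List (List (String × String))) (d : String) : Int :=
  results.foldl
    (fun acc row => if pvDeptId row == d && pvReordered row == "0" then acc + 1 else acc) 0

def pvBd (results : List (List (String × String))) : PySem.Dict String Int :=
  (PySem.Set.ofList (pvIds results)).foldl
    (fun dct d => dct.insert d (pvScan results d)) PySem.Dict.empty

theorem pvPortB_eq (results : List (List (String × String))) :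
    number_of_first_orders_alt results = (pvBd results).items := rfl

theorem pvB_items (results : List (List (String × String))) :
    number_of_first_orders_alt results =
      (PySem.Set.ofList (pvIds results)).map
        (fun v => (v, ((pvFirsts results).count v : Int))) := by
  have h := PySem.Dict.items_foldl_insert_fresh
    (PySem.Set.ofList (pvIds results)) (fun x => x) (fun d => pvScan results d)
    (PySem.Dict.empty : PySem.Dict String Int)
    (fun _ _ => by simp [PySem.Dict.contains_empty])
    (by simpa using PySem.Set.nodup_ofList (pvIds results))
  rw [pvPortB_eq]
  unfold pvBd
  rw [show ((PySem.Set.ofList (pvIds results)).foldl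
      (fun dct d => dct.insert d (pvScan results d)) PySem.Dict.empty).items =
      (PySem.Dict.empty : PySem.Dict String Int).items ++
        (PySem.Set.ofList (pvIds results)).map (fun d => (d, pvScan results d)) from h]
  rw [show (PySem.Dict.empty : PySem.Dict String Int).items = [] from rfl, List.nil_append]
  exact List.map_congr_left (fun v _ => by
    rw [show pvScan results v = results.foldl
        (fun acc row => if pvDeptId row == v && pvReordered row == "0" then acc + 1 else acc) 0
      from rfl, pvScan_eq_count v results 0, Int.zero_add])

theorem pvA_items (results : List (List (String × String))) :
    number_of_first_orders results =
      (PySem.Set.ofList (pvIds results)).map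
        (fun v => (v, ((pvFirsts results).count v : Int))) := by
  rw [pvPortA_eq]
  have hnd : (pvA results).keys.Nodup := by
    rw [pvA_keys]; exact PySem.Set.nodup_ofList _
  rw [PySem.Dict.items_eq_map_keys (pvA results) hnd 0, pvA_keys]
  exact List.map_congr_left (fun v _ => by rw [pvA_getD])

-- ===== VERDICT (by name: the statement is the Claim_ definition above) =====
theorem number_of_first_orders_spec : Claim_equal_number_of_first_orders := by
  intro results _ _
  unfold Spec_number_of_first_orders
  rw [pvA_items, pvB_items]
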